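-- pv_equiv track=rewrite | github.com/Laladj/infoPCSI | LALDJEE- DM4.py | regle4
-- ===== SOURCE A (Python) =====
-- def regle4(mot:str)->list:
--     output =[]
--     for lettre in range(0,len(mot)-1):
--         if mot[lettre:lettre+2] =="UU":
--             motRegle4 = mot[:lettre] + mot[lettre+2:]
--             if motRegle4 not in output:
--                 output.append(motRegle4)
--     return output if output != [] else None
-- ===== SOURCE B (Python) =====
-- def regle4(mot: str) -> list:
--     n = len(mot)
--     output = [mot[:i] + mot[i + 2:]
--               for i in range(n - 1)
--               if mot[i] == 'U' and mot[i + 1] == 'U' and (i == 0 or mot[i - 1] != 'U')]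
--     return output if output else None
-- ===== Notes on version B (the rewrite author's own statement) =====
-- stated objective: simpler
-- what changed: B drops A's membership-scan deduplication entirely: it emits one removal per maximal run of 'U's (local test: position i holds 'UU' and the previous char is not 'U'), since every removal inside one run yields the same string and removals from distinct runs always differ.
import Mathlib
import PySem

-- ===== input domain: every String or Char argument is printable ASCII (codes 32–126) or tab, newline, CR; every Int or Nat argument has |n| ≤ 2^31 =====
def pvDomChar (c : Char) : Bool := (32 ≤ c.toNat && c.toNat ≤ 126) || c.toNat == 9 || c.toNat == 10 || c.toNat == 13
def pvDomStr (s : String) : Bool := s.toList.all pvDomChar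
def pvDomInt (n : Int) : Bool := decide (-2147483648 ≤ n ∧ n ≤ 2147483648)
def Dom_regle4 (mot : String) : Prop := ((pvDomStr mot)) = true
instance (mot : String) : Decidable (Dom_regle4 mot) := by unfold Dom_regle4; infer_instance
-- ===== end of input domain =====

-- B replaces A's global membership-scan deduplication by a local run-start test (one emission per run of 'U's): simpler, no inner scan.

-- ===== PORT A =====
-- transliteration of A: scan every index, slice-compare with "UU", dedup via 'not in output'
def regle4 (mot : String) : Option (List String) :=
  let s := mot.toList
  let output := (PySem.List.pyRange 0 ((PySem.Str.len mot) - 1) 1).foldl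
    (fun output lettre =>
      if PySem.List.slice s (some lettre) (some (lettre + 2)) = ['U', 'U'] then
        let motRegle4 := String.ofList (PySem.List.slice s none (some lettre) ++
                                        PySem.List.slice s (some (lettre + 2)) none)
        if motRegle4 ∉ output then output ++ [motRegle4] else output
      else output) []
  if output ≠ [] then some output else none

-- ===== PORT B =====
-- transliteration of B: one comprehension keeping only run-start 'UU' pairs, no dedup
def regle4_alt (mot : String) : Option (List String) :=
  let s := mot.toList
  let n := s.length
  let output := ((List.range (n - 1)).filter (fun i =>
      (s.getD i ' ' == 'U') && (s.getD (i + 1) ' ' == 'U') &&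
      (i == 0 || s.getD (i - 1) ' ' != 'U'))).map
    (fun i => String.ofList (s.take i ++ s.drop (i + 2)))
  if output ≠ [] then some output else none

-- ===== PRECONDITION & SPEC =====
def Spec_regle4 (mot : String) (out : Option (List String)) : Prop := out = regle4_alt mot
instance (mot : String) (out : Option (List String)) : Decidable (Spec_regle4 mot out) := by unfold Spec_regle4; infer_instance

-- ===== CLAIM (what is proved, stated in full; the proofs are below) =====
def Claim_equal_regle4 : Prop := ∀ (mot : String), Dom_regle4 mot → Spec_regle4 mot (regle4 mot)

-- ===== LEMMAS AND PROOFS =====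

def pvRem (s : List Char) (i : Nat) : List Char := s.take i ++ s.drop (i + 2)
theorem pvRem_getD_lt {s : List Char} {i k : Nat} (h : k < i) (hi : i ≤ s.length) (d : Char) :
    (pvRem s i).getD k d = s.getD k d := by
  simp [pvRem, List.getD_eq_getElem?_getD, List.getElem?_append, List.length_take]
  rw [if_pos ⟨h, by omega⟩, List.getElem?_take_of_lt h]
theorem pvRem_getD_ge {s : List Char} {i k : Nat} (h : i ≤ k) (hi : i + 2 ≤ s.length) (d : Char) :
    (pvRem s i).getD k d = s.getD (k + 2) d := by
  simp [pvRem, List.getD_eq_getElem?_getD, List.getElem?_append, List.length_take, List.getElem?_drop]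
  rw [if_neg (by omega)]
  have : i + 2 + (k - min i s.length) = k + 2 := by omega
  rw [this]
theorem pvRem_length {s : List Char} {i : Nat} (hi : i + 2 ≤ s.length) :
    (pvRem s i).length = s.length - 2 := by
  simp [pvRem]; omega
theorem pvTake_two {s : List Char} {k : Nat} (h : k + 1 < s.length) :
    (s.drop k).take 2 = [s.getD k ' ', s.getD (k + 1) ' '] := by
  have h1 : k < s.length := by omega
  apply List.ext_getElem (by simp; omega)
  intro n hn1 hn2
  simp at hn2
  interval_cases n <;>
    simp [List.getElem_take, List.getElem_drop, List.getD_eq_getElem?_getD,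
      List.getElem?_eq_getElem, h, h1]
def pvP (s : List Char) (i : Nat) : Bool :=
  (s.getD i ' ' == 'U') && (s.getD (i + 1) ' ' == 'U') && (i == 0 || s.getD (i - 1) ' ' != 'U')
def pvOutB (s : List Char) (m : Nat) : List String :=
  ((List.range m).filter (pvP s)).map (fun i => String.ofList (s.take i ++ s.drop (i + 2)))

theorem pvP_eq_true {s : List Char} {i : Nat} : pvP s i = true ↔
    (s.getD i ' ' = 'U' ∧ s.getD (i + 1) ' ' = 'U' ∧ (i = 0 ∨ s.getD (i - 1) ' ' ≠ 'U')) := by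
  simp [pvP, and_assoc]

theorem pvRem_ne {s : List Char} {i j : Nat} (hij : i < j) (hj : j + 1 < s.length)
    (hjU1 : s.getD (j + 1) ' ' = 'U')
    (hjs : s.getD (j - 1) ' ' ≠ 'U') : pvRem s i ≠ pvRem s j := by
  intro heq
  have h1 := pvRem_getD_lt (s := s) (i := j) (k := j - 1) (by omega) (by omega) ' '
  have h2 := pvRem_getD_ge (s := s) (i := i) (k := j - 1) (by omega) (by omega) ' '
  rw [heq, h1] at h2
  have h3 : j - 1 + 2 = j + 1 := by omega
  rw [h3, hjU1] at h2
  exact hjs h2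

theorem pvRem_dup {s : List Char} {j : Nat} (hj : j + 1 < s.length) (hj0 : j ≠ 0)
    (h1 : s.getD (j - 1) ' ' = 'U') (h2 : s.getD j ' ' = 'U') (h3 : s.getD (j + 1) ' ' = 'U') :
    pvRem s (j - 1) = pvRem s j := by
  apply List.ext_getElem (by rw [pvRem_length (by omega), pvRem_length (by omega)])
  intro k hk1 hk2
  rw [pvRem_length (by omega)] at hk1
  rw [← List.getD_eq_getElem _ ' ', ← List.getD_eq_getElem _ ' ']
  rcases Nat.lt_trichotomy k (j - 1) with hlt | heq | hgt
  · rw [pvRem_getD_lt hlt (by omega) ' ', pvRem_getD_lt (by omega) (by omega) ' ']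
  · subst heq
    rw [pvRem_getD_ge (le_refl _) (by omega) ' ', pvRem_getD_lt (by omega) (by omega) ' ']
    rw [show j - 1 + 2 = j + 1 from by omega, h3, h1]
  · rw [pvRem_getD_ge (by omega) (by omega) ' ', pvRem_getD_ge (by omega) (by omega) ' ']

theorem pvOutB_mono {s : List Char} {m m' : Nat} (h : m ≤ m') {x : String}
    (hx : x ∈ pvOutB s m) : x ∈ pvOutB s m' := by
  simp only [pvOutB, List.mem_map, List.mem_filter, List.mem_range] at hx ⊢
  obtain ⟨i, ⟨hi, hp⟩, he⟩ := hx
  exact ⟨i, ⟨by omega, hp⟩, he⟩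

theorem pvMem_of_not_start {s : List Char} : ∀ j, j + 1 < s.length → j ≠ 0 →
    s.getD (j - 1) ' ' = 'U' → s.getD j ' ' = 'U' → s.getD (j + 1) ' ' = 'U' →
    String.ofList (pvRem s j) ∈ pvOutB s j := by
  intro j
  induction j using Nat.strong_induction_on with
  | _ j ih =>
    intro hj hj0 h1 h2 h3
    have hdup := pvRem_dup hj hj0 h1 h2 h3
    by_cases hst : j - 1 = 0 ∨ s.getD (j - 1 - 1) ' ' ≠ 'U'
    · have hp : pvP s (j - 1) = true := by
        rw [pvP_eq_true]
        exact ⟨h1, by rw [show j - 1 + 1 = j from by omega]; exact h2, hst⟩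
      rw [← hdup]
      simp only [pvOutB, List.mem_map, List.mem_filter, List.mem_range]
      exact ⟨j - 1, ⟨by omega, hp⟩, rfl⟩
    · push_neg at hst
      obtain ⟨hne, hU⟩ := hst
      have := ih (j - 1) (by omega) (by omega) hne hU h1
        (by rw [show j - 1 + 1 = j from by omega]; exact h2)
      rw [← hdup]
      exact pvOutB_mono (by omega) this

theorem pvOutB_succ (s : List Char) (m : Nat) :
    pvOutB s (m + 1) = pvOutB s m ++
      (if pvP s m then [String.ofList (s.take m ++ s.drop (m + 2))] else []) := by
  simp only [pvOutB, List.range_succ, List.filter_append, List.map_append]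
  congr 1
  by_cases h : pvP s m <;> simp [h]

theorem pvNotMem_of_start {s : List Char} {m : Nat} (hm1 : m + 1 < s.length)
    (huu1 : s.getD (m + 1) ' ' = 'U')
    (hst : m = 0 ∨ s.getD (m - 1) ' ' ≠ 'U') :
    String.ofList (s.take m ++ s.drop (m + 2)) ∉ pvOutB s m := by
  intro hmem
  simp only [pvOutB, List.mem_map, List.mem_filter, List.mem_range] at hmem
  obtain ⟨i, ⟨hi, hp⟩, he⟩ := hmem
  have heq : pvRem s i = pvRem s m := by
    have h' := congrArg String.toList he
    simpa using h'
  rcases hst with h0 | hne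
  · omega
  · exact pvRem_ne hi hm1 huu1 hne heq

theorem pvLoop_eq (s : List Char) : ∀ m, (∀ k, k < m → k + 1 < s.length) →
    (List.range m).foldl
      (fun output k =>
        if (s.drop k).take 2 = ['U', 'U'] then
          if String.ofList (s.take k ++ s.drop (k + 2)) ∉ output then
            output ++ [String.ofList (s.take k ++ s.drop (k + 2))]
          else output
        else output) [] = pvOutB s m := by
  intro m
  induction m with
  | zero => intro _; simp [pvOutB]
  | succ m ih =>
    intro hm
    have hm1 : m + 1 < s.length := hm m (by omega)
    rw [List.range_succ, List.foldl_append, ih (fun k hk => hm k (by omega))]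
    simp only [List.foldl_cons, List.foldl_nil]
    rw [pvTake_two hm1, pvOutB_succ]
    by_cases huu : s.getD m ' ' = 'U' ∧ s.getD (m + 1) ' ' = 'U'
    · rw [if_pos (by rw [huu.1, huu.2])]
      by_cases hst : m = 0 ∨ s.getD (m - 1) ' ' ≠ 'U'
      · have hp : pvP s m = true := pvP_eq_true.2 ⟨huu.1, huu.2, hst⟩
        rw [if_pos (pvNotMem_of_start hm1 huu.2 hst), if_pos hp]
      · push_neg at hst
        have hp : pvP s m = false := by
          rw [Bool.eq_false_iff]
          intro h
          rcases (pvP_eq_true.1 h).2.2 with h0 | hne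
          · exact hst.1 h0
          · exact hne hst.2
        have hmem := pvMem_of_not_start m hm1 hst.1 hst.2 huu.1 huu.2
        rw [if_neg (by simpa [pvRem] using hmem), hp]
        simp
    · have hp : pvP s m = false := by
        rw [Bool.eq_false_iff]
        intro h
        exact huu ⟨(pvP_eq_true.1 h).1, (pvP_eq_true.1 h).2.1⟩
      rw [if_neg (by intro h; exact huu ⟨by injection h, by injection h with _ h2; injection h2⟩), hp]
      simp

-- ===== VERDICT (by name: the statement is the Claim_ definition above) =====
theorem regle4_spec : Claim_equal_regle4 := by
  intro mot _
  show regle4 mot = regle4_alt mot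
  unfold regle4 regle4_alt
  simp only [PySem.Str.len_eq, sub_zero, PySem.List.pyRange_one, List.foldl_map, zero_add]
  rw [show (((mot.toList.length : Int) - 1).toNat) = mot.toList.length - 1 from by omega]
  rw [PySem.List.foldl_congr_mem (List.range (mot.toList.length - 1)) _
    (fun (output : List String) (k : Nat) =>
        if (mot.toList.drop k).take 2 = ['U', 'U'] then
          if String.ofList (mot.toList.take k ++ mot.toList.drop (k + 2)) ∉ output then
            output ++ [String.ofList (mot.toList.take k ++ mot.toList.drop (k + 2))]
          else output
        else output) []
    (by
      intro acc k _
      rw [show ((k : Int) + 2) = (((k + 2 : Nat)) : Int) from by push_cast; ring]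
      rw [PySem.List.slice_natCast, PySem.List.slice_to_natCast, PySem.List.slice_from_natCast]
      rw [show k + 2 - k = 2 from by omega])]
  rw [pvLoop_eq mot.toList (mot.toList.length - 1) (fun k hk => by omega)]
  rfl
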